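-- pv_equiv track=rewrite | github.com/daniel-reich/ubiquitous-fiesta | gLjL4aLT2ZwbMXafq_5.py | fair_swap
-- ===== SOURCE A (Python) =====
-- def fair_swap(l1, l2):
--   if (sum(l1) + sum(l2)) % 2 == 1:
--     return set()
--   avg = (sum(l1) + sum(l2))//2
--   pair2 = lambda x: avg - (sum(l1)-x)
--   pairs = [(el,pair2(el)) for el in list(set(l1)) if pair2(el) in l2]
--   sorted_pairs = sorted(pairs)
--   return set(sorted_pairs)
-- ===== SOURCE B (Python) =====
-- def fair_swap(l1, l2):
--     s1, s2 = sum(l1), sum(l2)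
--     if (s1 + s2) % 2 == 1:
--         return set()
--     d = (s1 + s2) // 2 - s1
--     a = sorted(set(l1))
--     b = sorted(set(l2))
--     out = []
--     i = j = 0
--     while i < len(a) and j < len(b):
--         t = a[i] + d
--         if t == b[j]:
--             out.append((a[i], t))
--             i += 1
--         elif t < b[j]:
--             i += 1
--         else:
--             j += 1
--     return set(out)
-- ===== Notes on version B (the rewrite author's own statement) =====
-- stated objective: alternative
-- what changed: Replaces the per-element linear membership scan of l2 (inside a comprehension over set(l1)) followed by a sort of the pairs with a sorted two-pointer merge of the deduplicated, sorted versions of both lists.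
import Mathlib
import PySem

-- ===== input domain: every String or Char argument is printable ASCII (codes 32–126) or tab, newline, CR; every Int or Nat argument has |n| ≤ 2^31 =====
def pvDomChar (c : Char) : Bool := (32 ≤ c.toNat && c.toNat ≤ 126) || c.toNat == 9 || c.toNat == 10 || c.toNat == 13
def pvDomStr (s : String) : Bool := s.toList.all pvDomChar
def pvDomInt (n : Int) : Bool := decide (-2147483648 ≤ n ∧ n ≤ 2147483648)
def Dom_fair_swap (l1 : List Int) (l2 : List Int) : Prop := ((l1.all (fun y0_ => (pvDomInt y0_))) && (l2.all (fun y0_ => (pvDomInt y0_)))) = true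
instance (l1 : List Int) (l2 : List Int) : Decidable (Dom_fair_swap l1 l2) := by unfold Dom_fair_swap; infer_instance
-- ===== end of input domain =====

-- ===== PORT A =====
-- B replaces A's per-element membership scan of l2 with a sorted two-pointer merge of the deduplicated lists (alternative algorithm).
def fair_swap (l1 : List Int) (l2 : List Int) : List (Int × Int) :=
  if PySem.Int.mod (l1.sum + l2.sum) 2 == 1 then [] else
  let avg := PySem.Int.floordiv (l1.sum + l2.sum) 2
  let pairs := ((PySem.Set.ofList l1).filter
      (fun el => l2.contains (avg - (l1.sum - el)))).map
      (fun el => (el, avg - (l1.sum - el)))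
  let sorted_pairs := PySem.List.sorted2 pairs Prod.fst Prod.snd false
  PySem.Set.ofList sorted_pairs

-- ===== PORT B =====
-- the two-pointer merge loop of Source B
def fsMerge (d : Int) : List Int → List Int → List (Int × Int)
  | [], _ => []
  | _ :: _, [] => []
  | x :: xs, y :: ys =>
    if x + d = y then (x, x + d) :: fsMerge d xs (y :: ys)
    else if x + d < y then fsMerge d xs (y :: ys)
    else fsMerge d (x :: xs) ys
termination_by a b => a.length + b.length

def fair_swap_alt (l1 : List Int) (l2 : List Int) : List (Int × Int) :=
  let s1 := l1.sum
  let s2 := l2.sum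
  if PySem.Int.mod (s1 + s2) 2 == 1 then [] else
  let d := PySem.Int.floordiv (s1 + s2) 2 - s1
  let a := PySem.List.sorted (PySem.Set.ofList l1) (fun x => x) false
  let b := PySem.List.sorted (PySem.Set.ofList l2) (fun x => x) false
  PySem.Set.ofList (fsMerge d a b)

-- ===== PRECONDITION & SPEC =====
def Spec_fair_swap (l1 : List Int) (l2 : List Int) (out : List (Int × Int)) : Prop := out = fair_swap_alt l1 l2
instance (l1 : List Int) (l2 : List Int) (out : List (Int × Int)) : Decidable (Spec_fair_swap l1 l2 out) := by unfold Spec_fair_swap; infer_instance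

-- ===== CLAIM (what is proved, stated in full; the proofs are below) =====
def Claim_equal_fair_swap : Prop := ∀ (l1 : List Int) (l2 : List Int), Dom_fair_swap l1 l2 → Spec_fair_swap l1 l2 (fair_swap l1 l2)

-- ===== LEMMAS AND PROOFS =====

-- insertBy with comparators that agree on a superset S of all elements involved
theorem insertBy_congr_on {α : Type} (S : List α) (b1 b2 : α → α → Bool)
    (hS : ∀ a ∈ S, ∀ b ∈ S, b1 a b = b2 a b) (x : α) (hx : x ∈ S) :
    ∀ ys, (∀ y ∈ ys, y ∈ S) → PySem.List.insertBy b1 x ys = PySem.List.insertBy b2 x ys := by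
  intro ys
  induction ys with
  | nil => intro _; rfl
  | cons y ys ih =>
    intro hys
    have hy : y ∈ S := hys y (by simp)
    have hys' : ∀ z ∈ ys, z ∈ S := fun z hz => hys z (by simp [hz])
    simp only [PySem.List.insertBy, hS x hx y hy, ih hys']

theorem foldl_insertBy_congr_on {α : Type} (S : List α) (b1 b2 : α → α → Bool)
    (hS : ∀ a ∈ S, ∀ b ∈ S, b1 a b = b2 a b) :
    ∀ (xs acc : List α), (∀ a ∈ xs, a ∈ S) → (∀ a ∈ acc, a ∈ S) →
      xs.foldl (fun acc x => PySem.List.insertBy b1 x acc) acc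
        = xs.foldl (fun acc x => PySem.List.insertBy b2 x acc) acc := by
  intro xs
  induction xs with
  | nil => intro acc _ _; rfl
  | cons x xs ih =>
    intro acc hxs hacc
    have hx : x ∈ S := hxs x (by simp)
    have hxs' : ∀ a ∈ xs, a ∈ S := fun a ha => hxs a (by simp [ha])
    have hacc' : ∀ a ∈ PySem.List.insertBy b1 x acc, a ∈ S := by
      intro a ha
      rcases (PySem.List.mem_insertBy b1 x a acc).mp ha with h | h
      · exact h ▸ hx
      · exact hacc a h
    simp only [List.foldl_cons, insertBy_congr_on S b1 b2 hS x hx acc hacc]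
    exact ih _ hxs' (by
      intro a ha
      rcases (PySem.List.mem_insertBy b2 x a acc).mp ha with h | h
      · exact h ▸ hx
      · exact hacc a (by
          have := insertBy_congr_on S b1 b2 hS x hx acc hacc
          rw [this] at *; exact h))

-- on pairs whose second component is first + d, the lexicographic tuple comparison is comparison of first components
theorem sorted2_eq_sorted_fst (d : Int) (ps : List (Int × Int))
    (h : ∀ p ∈ ps, p.2 = p.1 + d) :
    PySem.List.sorted2 ps Prod.fst Prod.snd false = PySem.List.sorted ps Prod.fst false := by
  show ps.foldl (fun acc x => PySem.List.insertBy _ x acc) [] = ps.foldl (fun acc x => PySem.List.insertBy _ x acc) []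
  apply foldl_insertBy_congr_on ps
  · intro a ha b hb
    have ha2 := h a ha
    have hb2 := h b hb
    simp only [Bool.false_eq_true, if_false]
    by_cases hp : a.1 < b.1 <;> by_cases hq : b.1 < a.1 <;>
      by_cases hr : a.1 + d < b.1 + d <;> simp [ha2, hb2, hp, hq, hr] <;> omega
  · exact fun a ha => ha
  · simp

-- the merge loop over ascending lists is a filter-and-map
theorem fsMerge_eq (d : Int) :
    ∀ (a b : List Int), a.Pairwise (· ≤ ·) → b.Pairwise (· < ·) →
      fsMerge d a b = (a.filter (fun x => b.contains (x + d))).map (fun x => (x, x + d)) := by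
  intro a
  induction a with
  | nil => intro b _ _; simp [fsMerge]
  | cons x xs iha =>
    intro b ha
    induction b with
    | nil => intro _; simp [fsMerge]
    | cons y ys ihb =>
      intro hb
      have hxle : ∀ z ∈ xs, x ≤ z := (List.pairwise_cons.mp ha).1
      have ha' : xs.Pairwise (· ≤ ·) := (List.pairwise_cons.mp ha).2
      have hylt : ∀ z ∈ ys, y < z := (List.pairwise_cons.mp hb).1
      have hb' : ys.Pairwise (· < ·) := (List.pairwise_cons.mp hb).2
      by_cases h1 : x + d = y
      · rw [show fsMerge d (x :: xs) (y :: ys) = (x, x + d) :: fsMerge d xs (y :: ys) by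
          rw [fsMerge]; simp [h1]]
        rw [iha (y :: ys) ha' hb]
        simp [h1]
      · by_cases h2 : x + d < y
        · rw [show fsMerge d (x :: xs) (y :: ys) = fsMerge d xs (y :: ys) by
            rw [fsMerge]; simp [h1, h2]]
          rw [iha (y :: ys) ha' hb]
          have hnm : (x + d) ∉ y :: ys := by
            intro hm
            rcases List.mem_cons.mp hm with hm | hm
            · omega
            · exact absurd (hylt _ hm) (by omega)
          have hn2 : x + d ∉ ys := fun hm => hnm (List.mem_cons_of_mem _ hm)
          simp [h1, hn2]
        · rw [show fsMerge d (x :: xs) (y :: ys) = fsMerge d (x :: xs) ys by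
            rw [fsMerge]; simp [h1, h2]]
          rw [ihb hb']
          congr 1
          apply List.filter_congr
          intro z hz
          have hxz : x ≤ z := by
            rcases List.mem_cons.mp hz with rfl | hz
            · exact le_refl _
            · exact hxle z hz
          have hne : z + d ≠ y := by omega
          simp [hne]

-- ===== VERDICT (by name: the statement is the Claim_ definition above) =====
theorem fair_swap_spec : Claim_equal_fair_swap := by
  intro l1 l2 _
  unfold Spec_fair_swap
  simp only [fair_swap, fair_swap_alt]
  by_cases hodd : (PySem.Int.mod (l1.sum + l2.sum) 2 == 1) = true
  · rw [if_pos hodd, if_pos hodd]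
  · rw [if_neg hodd, if_neg hodd]
    set avg := PySem.Int.floordiv (l1.sum + l2.sum) 2 with havg
    set D := avg - l1.sum with hD
    have harith : ∀ el : Int, avg - (l1.sum - el) = el + D := fun el => by rw [hD]; ring
    have hfun : (fun el : Int => (el, avg - (l1.sum - el))) = (fun el : Int => (el, el + D)) :=
      funext fun el => by rw [harith el]
    have hpred : (fun el : Int => l2.contains (avg - (l1.sum - el)))
        = (fun el : Int => l2.contains (el + D)) := funext fun el => by rw [harith el]
    rw [hfun, hpred]
    set F := (PySem.Set.ofList l1).filter (fun el : Int => l2.contains (el + D)) with hF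
    set A1 := PySem.List.sorted (PySem.Set.ofList l1) (fun x => x) false with hA1
    set B2 := PySem.List.sorted (PySem.Set.ofList l2) (fun x => x) false with hB2
    have hA1lt : A1.Pairwise (· < ·) := PySem.List.sorted_ofList_pairwise_lt l1
    have hB2lt : B2.Pairwise (· < ·) := PySem.List.sorted_ofList_pairwise_lt l2
    -- A's sorted list of pairs is the first components sorted, paired up
    have hpairs2 : ∀ p ∈ F.map (fun el : Int => (el, el + D)), p.2 = p.1 + D := by
      intro p hp
      rcases List.mem_map.mp hp with ⟨el, _, rfl⟩
      rfl
    have hFnodup : F.Nodup := (PySem.Set.nodup_ofList l1).filter _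
    have hsFlt : (PySem.List.sorted F (fun x => x) false).Pairwise (· < ·) := by
      have hle := PySem.List.sorted_pairwise F (fun x => x)
      have hnd : (PySem.List.sorted F (fun x => x) false).Nodup :=
        ((PySem.List.sorted_perm F (fun x => x) false).nodup_iff).mpr hFnodup
      exact hle.imp₂ (fun a b hab hne => lt_of_le_of_ne hab hne) hnd
    have hAside : PySem.List.sorted2 (F.map (fun el : Int => (el, el + D))) Prod.fst Prod.snd false
        = (PySem.List.sorted F (fun x => x) false).map (fun el : Int => (el, el + D)) := by
      rw [sorted2_eq_sorted_fst D _ hpairs2]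
      apply PySem.List.sorted_eq_of_perm_of_pairwise_lt
      · exact (PySem.List.sorted_perm F (fun x => x) false).map _
      · rw [List.pairwise_map]
        exact hsFlt
    -- B's merge is the same list
    have hcontB : (fun x : Int => B2.contains (x + D)) = (fun x : Int => l2.contains (x + D)) := by
      funext x
      have : (x + D) ∈ B2 ↔ (x + D) ∈ l2 := by
        rw [hB2, PySem.List.mem_sorted, PySem.Set.mem_ofList]
      simp only [List.contains_eq_mem, decide_eq_decide]
      exact this
    have hBside : fsMerge D A1 B2 = (PySem.List.sorted F (fun x => x) false).map (fun el : Int => (el, el + D)) := by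
      rw [fsMerge_eq D A1 B2 (hA1lt.imp le_of_lt) hB2lt, hcontB]
      have hfilter : A1.filter (fun x : Int => l2.contains (x + D)) = PySem.List.sorted F (fun x => x) false := by
        symm
        apply PySem.List.sorted_eq_of_perm_of_pairwise_lt
        · exact (PySem.List.sorted_perm (PySem.Set.ofList l1) (fun x => x) false).filter _
        · exact hA1lt.sublist List.filter_sublist
      rw [hfilter]
    rw [hAside, hBside]
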